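-- pv_equiv track=rewrite | github.com/sawanch/ai-git-assistant | ai_git_assistant.py | clean_commit_message
-- ===== SOURCE A (Python) =====
-- def clean_commit_message(raw: str) -> str:
--     lines = [l.rstrip() for l in raw.splitlines()]
--     out = []
--     for l in lines:
--         s = l.strip()
--         if not s:
--             if out and out[-1] != "":
--                 out.append("")
--             continue
--         if s.startswith("```"):
--             continue
--         out.append(s)
--     # collapse multiple blanks
--     cleaned = []
--     for l in out:
--         if l == "" and (not cleaned or cleaned[-1] == ""):
--             continue
--         cleaned.append(l)
--     return "\n".join(cleaned).strip()
-- ===== SOURCE B (Python) =====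
-- def clean_commit_message(raw: str) -> str:
--     # Group stripped, non-fence lines into blank-separated paragraphs,
--     # then render the paragraphs joined by a blank line.
--     paragraphs = []
--     current = []
--     for line in raw.splitlines():
--         s = line.strip()
--         if s.startswith("```"):
--             continue
--         if s:
--             current.append(s)
--         elif current:
--             paragraphs.append(current)
--             current = []
--     if current:
--         paragraphs.append(current)
--     return "\n\n".join("\n".join(p) for p in paragraphs)
-- ===== Notes on version B (the rewrite author's own statement) =====
-- stated objective: simpler
-- what changed: B groups the stripped non-fence lines into blank-separated paragraphs in one pass and renders the paragraphs joined by a blank line, replacing A's sentinel-blank insertion, second blank-collapsing pass and final strip.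
import Mathlib
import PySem

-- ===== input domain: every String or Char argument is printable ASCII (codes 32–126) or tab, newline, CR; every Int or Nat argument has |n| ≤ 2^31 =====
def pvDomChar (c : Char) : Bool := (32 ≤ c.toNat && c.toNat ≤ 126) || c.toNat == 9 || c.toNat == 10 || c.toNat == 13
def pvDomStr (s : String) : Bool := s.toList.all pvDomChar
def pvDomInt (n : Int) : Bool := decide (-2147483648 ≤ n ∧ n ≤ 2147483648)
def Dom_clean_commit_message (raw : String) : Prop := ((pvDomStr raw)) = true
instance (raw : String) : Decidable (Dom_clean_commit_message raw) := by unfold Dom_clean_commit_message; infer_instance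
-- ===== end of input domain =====

-- B groups the stripped non-fence lines into blank-separated paragraphs in one pass and renders the
-- paragraphs joined by a blank line, replacing A's sentinel-blank insertion, second collapsing pass and final strip.

-- ===== PORT A =====
def pvA_loop : List String → List String → List String
  | out, [] => out
  | out, l :: ls =>
    let s := PySem.Str.strip l
    if s = "" then
      if out ≠ [] ∧ out.getLast? ≠ some "" then pvA_loop (out ++ [""]) ls
      else pvA_loop out ls
    else if PySem.Str.startswith s "```" then pvA_loop out ls
    else pvA_loop (out ++ [s]) ls

def pvA_collapse : List String → List String → List String
  | cleaned, [] => cleaned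
  | cleaned, l :: ls =>
    if l = "" ∧ (cleaned = [] ∨ cleaned.getLast? = some "") then pvA_collapse cleaned ls
    else pvA_collapse (cleaned ++ [l]) ls

def clean_commit_message (raw : String) : String :=
  let lines := (PySem.Str.splitlines raw).map PySem.Str.rstrip
  PySem.Str.strip (PySem.Str.join "\n" (pvA_collapse [] (pvA_loop [] lines)))

-- ===== PORT B =====
def pvB_loop : List (List String) → List String → List String → List (List String) × List String
  | paras, current, [] => (paras, current)
  | paras, current, line :: ls =>
    let s := PySem.Str.strip line
    if PySem.Str.startswith s "```" then pvB_loop paras current ls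
    else if s ≠ "" then pvB_loop paras (current ++ [s]) ls
    else if current ≠ [] then pvB_loop (paras ++ [current]) [] ls
    else pvB_loop paras current ls

def clean_commit_message_alt (raw : String) : String :=
  let st := pvB_loop [] [] (PySem.Str.splitlines raw)
  let paras := if st.2 = [] then st.1 else st.1 ++ [st.2]
  PySem.Str.join "\n\n" (paras.map (PySem.Str.join "\n"))

-- ===== PRECONDITION & SPEC =====
def Spec_clean_commit_message (raw : String) (out : String) : Prop := out = clean_commit_message_alt raw
instance (raw : String) (out : String) : Decidable (Spec_clean_commit_message raw out) := by unfold Spec_clean_commit_message; infer_instance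

-- ===== CLAIM (what is proved, stated in full; the proofs are below) =====
def Claim_equal_clean_commit_message : Prop := ∀ (raw : String), Dom_clean_commit_message raw → Spec_clean_commit_message raw (clean_commit_message raw)

-- ===== LEMMAS AND PROOFS =====

-- char-level facts about Python strip/lstrip/rstrip
theorem pv_dropWhile_eq_self (xs : List Char)
    (h : ∀ c, xs.head? = some c → PySem.Chars.isspace c = false) :
    List.dropWhile PySem.Chars.isspace xs = xs := by
  cases xs with
  | nil => rfl
  | cons c t => rw [List.dropWhile_cons, if_neg]; simp [h c rfl]

theorem pv_head_not_space (xs : List Char)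
    (h : List.dropWhile PySem.Chars.isspace xs = xs) :
    ∀ c, xs.head? = some c → PySem.Chars.isspace c = false := by
  intro c hc
  cases xs with
  | nil => simp at hc
  | cons d t =>
    obtain rfl : d = c := by simpa using hc
    by_contra hs
    rw [List.dropWhile_cons, if_pos (by simpa using hs)] at h
    have hle := List.length_dropWhile_le (p := PySem.Chars.isspace) (l := t)
    have h2 := congrArg List.length h
    simp at h2
    omega

theorem pv_rstrip_cons (c : Char) (l : List Char) :
    PySem.Chars.rstrip (c :: l) =
      if PySem.Chars.rstrip l = [] then (if PySem.Chars.isspace c then [] else [c])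
      else c :: PySem.Chars.rstrip l := by
  simp only [PySem.Chars.rstrip, List.reverse_cons, List.dropWhile_append]
  by_cases h : List.dropWhile PySem.Chars.isspace l.reverse = []
  · rw [if_pos (by simp [h]), if_pos (by simp [h]), List.dropWhile_cons]
    by_cases hc : PySem.Chars.isspace c
    · simp [hc]
    · simp [hc]
  · rw [if_neg (by simp [h]), if_neg (by simp [h])]
    simp

theorem pv_rstrip_eq_nil_iff (l : List Char) :
    PySem.Chars.rstrip l = [] ↔ ∀ c ∈ l, PySem.Chars.isspace c = true := by
  simp [PySem.Chars.rstrip, List.dropWhile_eq_nil_iff]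

theorem pv_lstrip_cons (c : Char) (l : List Char) :
    PySem.Chars.lstrip (c :: l) =
      if PySem.Chars.isspace c then PySem.Chars.lstrip l else c :: l := by
  simp [PySem.Chars.lstrip, List.dropWhile_cons]

theorem pv_lstrip_rstrip_comm (l : List Char) :
    PySem.Chars.lstrip (PySem.Chars.rstrip l) = PySem.Chars.rstrip (PySem.Chars.lstrip l) := by
  induction l with
  | nil => rfl
  | cons c l ih =>
    rw [pv_rstrip_cons, pv_lstrip_cons]
    by_cases hr : PySem.Chars.rstrip l = []
    · rw [if_pos hr]
      by_cases hc : PySem.Chars.isspace c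
      · rw [if_pos hc, if_pos hc]
        have hall := (pv_rstrip_eq_nil_iff l).mp hr
        have : PySem.Chars.rstrip (PySem.Chars.lstrip l) = [] :=
          (pv_rstrip_eq_nil_iff _).mpr
            (fun x hx => hall x ((List.dropWhile_sublist _).subset hx))
        simpa [PySem.Chars.lstrip, hc] using this
      · rw [if_neg hc, if_neg hc, pv_lstrip_cons, if_neg hc, pv_rstrip_cons, if_pos hr, if_neg hc]
    · rw [if_neg hr]
      by_cases hc : PySem.Chars.isspace c
      · rw [if_pos hc, pv_lstrip_cons, if_pos hc, ih]
      · rw [if_neg hc, pv_lstrip_cons, if_neg hc, pv_rstrip_cons, if_neg hr]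

theorem pv_rstrip_idem (l : List Char) :
    PySem.Chars.rstrip (PySem.Chars.rstrip l) = PySem.Chars.rstrip l := by
  simp [PySem.Chars.rstrip, List.reverse_reverse, List.dropWhile_idempotent]

theorem pv_lstrip_idem (l : List Char) :
    PySem.Chars.lstrip (PySem.Chars.lstrip l) = PySem.Chars.lstrip l :=
  List.dropWhile_idempotent _ _

theorem pv_strip_rstrip_chars (l : List Char) :
    PySem.Chars.strip (PySem.Chars.rstrip l) = PySem.Chars.strip l := by
  simp only [PySem.Chars.strip]
  rw [pv_lstrip_rstrip_comm, pv_rstrip_idem]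

theorem pv_strip_idem_chars (l : List Char) :
    PySem.Chars.strip (PySem.Chars.strip l) = PySem.Chars.strip l := by
  simp only [PySem.Chars.strip]
  rw [pv_lstrip_rstrip_comm, pv_lstrip_idem, pv_rstrip_idem]

theorem str_strip_rstrip (l : String) :
    PySem.Str.strip (PySem.Str.rstrip l) = PySem.Str.strip l :=
  String.toList_inj.mp
    (by simp [PySem.Str.toList_strip, PySem.Str.toList_rstrip, pv_strip_rstrip_chars])

theorem str_strip_idem (l : String) :
    PySem.Str.strip (PySem.Str.strip l) = PySem.Str.strip l :=
  String.toList_inj.mp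
    (by simp [PySem.Str.toList_strip, pv_strip_idem_chars])

theorem pv_rstrip_sublist (l : List Char) : List.Sublist (PySem.Chars.rstrip l) l := by
  have h := (List.dropWhile_sublist (l := l.reverse) (p := PySem.Chars.isspace)).reverse
  simpa [PySem.Chars.rstrip] using h

theorem pv_strip_parts (l : List Char) (h : PySem.Chars.strip l = l) :
    PySem.Chars.lstrip l = l ∧ PySem.Chars.rstrip l = l := by
  have hsub1 : List.Sublist (PySem.Chars.lstrip l) l := List.dropWhile_sublist _
  have hsub2 : List.Sublist l (PySem.Chars.lstrip l) := by
    conv_lhs => rw [← h]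
    exact pv_rstrip_sublist _
  have hL : PySem.Chars.lstrip l = l := hsub1.antisymm hsub2
  refine ⟨hL, ?_⟩
  simp only [PySem.Chars.strip, hL] at h
  exact h

-- invariant predicates on the loop state
def GoodStr (x : String) : Prop := x ≠ "" ∧ PySem.Str.strip x = x
def GoodCur (c : List String) : Prop := ∀ x ∈ c, GoodStr x
def GoodPs (ps : List (List String)) : Prop := ∀ p ∈ ps, p ≠ [] ∧ ∀ x ∈ p, GoodStr x

theorem pv_good_facts (x : String) (hx : GoodStr x) :
    x.toList ≠ [] ∧ (∀ c, x.toList.head? = some c → PySem.Chars.isspace c = false)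
      ∧ (∀ c, x.toList.getLast? = some c → PySem.Chars.isspace c = false) := by
  obtain ⟨hne, hs⟩ := hx
  have hchar : PySem.Chars.strip x.toList = x.toList := by
    have h2 := congrArg String.toList hs
    simpa [PySem.Str.toList_strip] using h2
  obtain ⟨hL, hR⟩ := pv_strip_parts _ hchar
  refine ⟨?_, pv_head_not_space _ hL, ?_⟩
  · intro h0
    exact hne (String.toList_inj.mp (by simp [h0]))
  · intro c hc
    have hrev : List.dropWhile PySem.Chars.isspace x.toList.reverse = x.toList.reverse := by
      have h3 := congrArg List.reverse hR
      simpa [PySem.Chars.rstrip] using h3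
    exact pv_head_not_space _ hrev c (by simpa using hc)

theorem pv_strip_of_ends (l : List Char)
    (hh : ∀ c, l.head? = some c → PySem.Chars.isspace c = false)
    (hl : ∀ c, l.getLast? = some c → PySem.Chars.isspace c = false) :
    PySem.Chars.strip l = l := by
  have hL : PySem.Chars.lstrip l = l := pv_dropWhile_eq_self l hh
  have hR : PySem.Chars.rstrip l = l := by
    have h1 : List.dropWhile PySem.Chars.isspace l.reverse = l.reverse :=
      pv_dropWhile_eq_self _ (fun c hc => hl c (by simpa using hc))
    simp [PySem.Chars.rstrip, h1]
  simp only [PySem.Chars.strip, hL, hR]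

theorem pv_strip_append_nl (l : List Char) (hne : l ≠ [])
    (hh : ∀ c, l.head? = some c → PySem.Chars.isspace c = false)
    (hl : ∀ c, l.getLast? = some c → PySem.Chars.isspace c = false) :
    PySem.Chars.strip (l ++ ['\n']) = l := by
  have hL : PySem.Chars.lstrip (l ++ ['\n']) = l ++ ['\n'] := by
    apply pv_dropWhile_eq_self
    intro c hc
    cases l with
    | nil => exact absurd rfl hne
    | cons d t => exact hh c (by simpa using hc)
  have hR : PySem.Chars.rstrip (l ++ ['\n']) = l := by
    simp only [PySem.Chars.rstrip]
    rw [show (l ++ ['\n']).reverse = '\n' :: l.reverse by simp]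
    rw [List.dropWhile_cons, if_pos (by decide)]
    rw [pv_dropWhile_eq_self _ (fun c hc => hl c (by simpa using hc))]
    simp
  simp only [PySem.Chars.strip, hL, hR]

-- join facts
theorem pv_join_head (sep : List Char) (a : List Char) (rest : List (List Char)) (h : a ≠ []) :
    (PySem.Chars.join sep (a :: rest)).head? = a.head? := by
  cases rest with
  | nil => rw [PySem.Chars.join_singleton]
  | cons b r =>
    rw [PySem.Chars.join_cons_cons]
    cases a with
    | nil => exact absurd rfl h
    | cons c t => simp

theorem pv_join_last (sep : List Char) (xs : List (List Char)) (a : List Char) (h : a ≠ []) :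
    (PySem.Chars.join sep (xs ++ [a])).getLast? = a.getLast? := by
  induction xs with
  | nil => rw [List.nil_append, PySem.Chars.join_singleton]
  | cons b r ih =>
    obtain ⟨q, rest, hqr⟩ : ∃ q rest, r ++ [a] = q :: rest := by
      cases hr : r ++ [a] with
      | nil => exact absurd hr (by simp)
      | cons q rest => exact ⟨q, rest, rfl⟩
    rw [List.cons_append, hqr, PySem.Chars.join_cons_cons, ← hqr]
    obtain ⟨c, hc⟩ : ∃ c, a.getLast? = some c := by
      cases ha : a.getLast? with
      | none => exact absurd (List.getLast?_eq_none_iff.mp ha) h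
      | some c => exact ⟨c, rfl⟩
    simp [List.getLast?_append, ih, hc]

theorem pv_join_append (sep : List Char) (xs ys : List (List Char)) (hx : xs ≠ []) (hy : ys ≠ []) :
    PySem.Chars.join sep (xs ++ ys)
      = PySem.Chars.join sep xs ++ sep ++ PySem.Chars.join sep ys := by
  induction xs with
  | nil => exact absurd rfl hx
  | cons a r ih =>
    cases r with
    | nil =>
      obtain ⟨q, rest, rfl⟩ : ∃ q rest, ys = q :: rest := by
        cases ys with
        | nil => exact absurd rfl hy
        | cons q rest => exact ⟨q, rest, rfl⟩
      rw [show ([a] ++ (q :: rest)) = a :: q :: rest by simp]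
      rw [PySem.Chars.join_cons_cons, PySem.Chars.join_singleton]
    | cons b r2 =>
      rw [show ((a :: b :: r2) ++ ys) = a :: ((b :: r2) ++ ys) by simp]
      rw [show ((b :: r2) ++ ys : List (List Char)) = b :: (r2 ++ ys) by simp] 
      rw [PySem.Chars.join_cons_cons]
      rw [show (b :: (r2 ++ ys) : List (List Char)) = (b :: r2) ++ ys by simp]
      rw [ih (by simp), PySem.Chars.join_cons_cons]
      simp [List.append_assoc]

-- the A-loop state as a flat list: each finished paragraph followed by one sentinel blank
def pvPre : List (List String) → List String
  | [] => []
  | p :: ps => p ++ "" :: pvPre ps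

theorem pvPre_append (ps : List (List String)) (c : List String) :
    pvPre (ps ++ [c]) = pvPre ps ++ c ++ [""] := by
  induction ps with
  | nil => simp [pvPre]
  | cons p ps ih => simp [pvPre, ih]

theorem pvPre_ne_nil (ps : List (List String)) (h : ps ≠ []) : pvPre ps ≠ [] := by
  cases ps with
  | nil => exact absurd rfl h
  | cons p r => simp [pvPre]

theorem pvPre_getLast (ps : List (List String)) (h : ps ≠ []) :
    (pvPre ps).getLast? = some "" := by
  induction ps with
  | nil => exact absurd rfl h
  | cons p ps ih =>
    cases ps with
    | nil => simp [pvPre]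
    | cons q r =>
      have h2 : (pvPre (q :: r)).getLast? = some "" := ih (by simp)
      show (p ++ ([""] ++ pvPre (q :: r))).getLast? = some ""
      rw [List.getLast?_append, List.getLast?_append, h2]
      rfl

-- the loop invariant: A's out-list is exactly B's paragraph state, flattened
theorem pv_inv (ls : List String) : ∀ (paras : List (List String)) (current : List String),
    GoodPs paras → GoodCur current →
    pvA_loop (pvPre paras ++ current) (ls.map PySem.Str.rstrip)
        = pvPre (pvB_loop paras current ls).1 ++ (pvB_loop paras current ls).2
      ∧ GoodPs (pvB_loop paras current ls).1 ∧ GoodCur (pvB_loop paras current ls).2 := by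
  induction ls with
  | nil =>
    intro paras current hp hc
    exact ⟨rfl, hp, hc⟩
  | cons l ls ih =>
    intro paras current hp hc
    simp only [List.map_cons, pvA_loop, pvB_loop, str_strip_rstrip]
    by_cases hb : PySem.Str.strip l = ""
    · rw [if_pos hb, hb]
      rw [if_neg (by decide : ¬ (PySem.Str.startswith "" "```" = true))]
      rw [if_neg (by simp : ¬ ("" : String) ≠ "")]
      by_cases hcur : current = []
      · subst hcur
        rw [if_neg (by simp : ¬ ([] : List String) ≠ [])]
        rw [if_neg ?_]
        · exact ih paras [] hp hc
        · rintro ⟨h1, h2⟩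
          cases paras with
          | nil => exact h1 (by simp [pvPre])
          | cons q r =>
            apply h2
            rw [List.append_nil]
            exact pvPre_getLast (q :: r) (by simp)
      · obtain ⟨y, hy⟩ : ∃ y, current.getLast? = some y := by
          cases hcl : current.getLast? with
          | none => exact absurd (List.getLast?_eq_none_iff.mp hcl) hcur
          | some y => exact ⟨y, rfl⟩
        have hygood : GoodStr y := hc y (List.mem_of_getLast? hy)
        rw [if_pos hcur, if_pos ?_]
        · have harg : (pvPre paras ++ current) ++ [""] = pvPre (paras ++ [current]) ++ [] := by
            rw [pvPre_append]; simp
          rw [harg]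
          apply ih (paras ++ [current]) []
          · intro p hpmem
            rcases List.mem_append.mp hpmem with h1 | h2
            · exact hp p h1
            · obtain rfl : p = current := by simpa using h2
              exact ⟨hcur, hc⟩
          · intro x hx; simp at hx
        · constructor
          · simp [hcur]
          · rw [List.getLast?_append, hy]
            simpa using hygood.1
    · rw [if_neg hb]
      by_cases hf : PySem.Str.startswith (PySem.Str.strip l) "```" = true
      · rw [if_pos hf, if_pos hf]
        exact ih paras current hp hc
      · rw [if_neg hf, if_neg hf, if_pos hb]
        have harg : (pvPre paras ++ current) ++ [PySem.Str.strip l]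
            = pvPre paras ++ (current ++ [PySem.Str.strip l]) := by simp
        rw [harg]
        apply ih paras (current ++ [PySem.Str.strip l]) hp
        intro x hx
        rcases List.mem_append.mp hx with h1 | h2
        · exact hc x h1
        · obtain rfl : x = PySem.Str.strip l := by simpa using h2
          exact ⟨hb, str_strip_idem l⟩

-- A's second pass is the identity on the flattened state
theorem pv_collapse_skip (q : List String) : ∀ (acc rest : List String),
    (∀ x ∈ q, x ≠ "") →
    pvA_collapse acc (q ++ rest) = pvA_collapse (acc ++ q) rest := by
  induction q with
  | nil => intro acc rest _; simp
  | cons x q ih =>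
    intro acc rest hne
    rw [List.cons_append]
    simp only [pvA_collapse]
    rw [if_neg (fun hand => hne x (by simp) hand.1)]
    rw [ih (acc ++ [x]) rest (fun z hz => hne z (by simp [hz]))]
    simp

theorem pv_collapse_main (P : List (List String)) : ∀ (C : List String) (acc : List String),
    GoodPs P → GoodCur C →
    pvA_collapse acc (pvPre P ++ C) = acc ++ (pvPre P ++ C) := by
  induction P with
  | nil =>
    intro C acc _ hC
    rw [show pvPre [] ++ C = C ++ [] by simp [pvPre], pv_collapse_skip C acc [] (fun x hx => (hC x hx).1)]
    simp [pvA_collapse]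
  | cons p P ih =>
    intro C acc hP hC
    have hp := hP p (by simp)
    have harg : pvPre (p :: P) ++ C = p ++ ("" :: (pvPre P ++ C)) := by simp [pvPre]
    rw [harg, pv_collapse_skip p acc _ (fun x hx => (hp.2 x hx).1)]
    simp only [pvA_collapse]
    obtain ⟨y, hy⟩ : ∃ y, p.getLast? = some y := by
      cases hcl : p.getLast? with
      | none => exact absurd (List.getLast?_eq_none_iff.mp hcl) hp.1
      | some y => exact ⟨y, rfl⟩
    have hyne : y ≠ "" := (hp.2 y (List.mem_of_getLast? hy)).1
    rw [if_neg ?_]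
    · rw [show (acc ++ p) ++ [""] = acc ++ (p ++ [""]) by simp]
      rw [ih C (acc ++ (p ++ [""])) (fun q hq => hP q (by simp [hq])) hC]
      simp
    · rintro ⟨-, h2 | h2⟩
      · rw [List.append_eq_nil_iff] at h2
        exact hp.1 h2.2
      · rw [List.getLast?_append, hy] at h2
        simp at h2
        exact hyne h2
-- rendering: join with '\n' after flattening = join paragraphs with '\n\n'
def pvJ (p : List String) : List Char := PySem.Chars.join ['\n'] (p.map String.toList)

theorem pvJ_append (xs ys : List String) (hx : xs ≠ []) (hy : ys ≠ []) :
    pvJ (xs ++ ys) = pvJ xs ++ ['\n'] ++ pvJ ys := by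
  unfold pvJ
  rw [List.map_append, pv_join_append _ _ _ (by simp [hx]) (by simp [hy])]

theorem pvJ_blank_cons (ys : List String) (hy : ys ≠ []) :
    pvJ ("" :: ys) = '\n' :: pvJ ys := by
  unfold pvJ
  rw [show (("" :: ys).map String.toList) = [([] : List Char)] ++ ys.map String.toList by simp]
  rw [pv_join_append _ _ _ (by simp) (by simp [hy]), PySem.Chars.join_singleton]
  simp

theorem pvJ2_cons (x : List Char) (rest : List (List Char)) (hr : rest ≠ []) :
    PySem.Chars.join ['\n', '\n'] (x :: rest)
      = x ++ ['\n', '\n'] ++ PySem.Chars.join ['\n', '\n'] rest := by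
  rw [show (x :: rest) = [x] ++ rest by simp]
  rw [pv_join_append _ _ _ (by simp) hr, PySem.Chars.join_singleton]

theorem pv_R1 (C : List String) (hC : C ≠ []) : ∀ (P : List (List String)), GoodPs P →
    pvJ (pvPre P ++ C) = PySem.Chars.join ['\n', '\n'] ((P ++ [C]).map pvJ) := by
  intro P
  induction P with
  | nil =>
    intro _
    simp [pvPre, PySem.Chars.join_singleton]
  | cons p P ih =>
    intro hP
    have hp := hP p (by simp)
    have hPs : GoodPs P := fun q hq => hP q (by simp [hq])
    rw [show pvPre (p :: P) ++ C = p ++ ("" :: (pvPre P ++ C)) by simp [pvPre]]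
    rw [pvJ_append p _ hp.1 (by simp), pvJ_blank_cons _ (by simp [hC]), ih hPs]
    rw [List.cons_append, List.map_cons, pvJ2_cons _ _ (by simp)]
    simp [List.append_assoc]

theorem pv_R2 : ∀ (P : List (List String)), GoodPs P → P ≠ [] →
    pvJ (pvPre P) = PySem.Chars.join ['\n', '\n'] (P.map pvJ) ++ ['\n'] := by
  intro P
  induction P with
  | nil => intro _ h; exact absurd rfl h
  | cons p P ih =>
    intro hP _
    have hp := hP p (by simp)
    have hPs : GoodPs P := fun q hq => hP q (by simp [hq])
    cases P with
    | nil =>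
      rw [show pvPre [p] = p ++ [""] by simp [pvPre]]
      rw [pvJ_append p [""] hp.1 (by simp)]
      rw [show pvJ [""] = [] from rfl]
      simp [PySem.Chars.join_singleton]
    | cons q r =>
      rw [show pvPre (p :: q :: r) = p ++ ("" :: pvPre (q :: r)) by simp [pvPre]]
      rw [pvJ_append p _ hp.1 (by simp),
          pvJ_blank_cons _ (pvPre_ne_nil (q :: r) (by simp)), ih hPs (by simp)]
      conv_rhs => rw [List.map_cons, pvJ2_cons (pvJ p) (List.map pvJ (q :: r)) (by simp)]
      simp [List.append_assoc]

-- ends of the rendered text are non-whitespace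
theorem pv_join_good_ends (sep : List Char) (parts : List (List Char)) (hne : parts ≠ [])
    (h : ∀ cs ∈ parts, cs ≠ [] ∧ (∀ c, cs.head? = some c → PySem.Chars.isspace c = false)
          ∧ (∀ c, cs.getLast? = some c → PySem.Chars.isspace c = false)) :
    PySem.Chars.join sep parts ≠ []
      ∧ (∀ c, (PySem.Chars.join sep parts).head? = some c → PySem.Chars.isspace c = false)
      ∧ (∀ c, (PySem.Chars.join sep parts).getLast? = some c → PySem.Chars.isspace c = false) := by
  obtain ⟨a, rest, rfl⟩ : ∃ a rest, parts = a :: rest := by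
    cases parts with
    | nil => exact absurd rfl hne
    | cons a rest => exact ⟨a, rest, rfl⟩
  have hhead := pv_join_head sep a rest (h a (by simp)).1
  have hx : a :: rest = (a :: rest).dropLast ++ [(a :: rest).getLast (by simp)] :=
    (List.dropLast_append_getLast (by simp)).symm
  have hbmem : (a :: rest).getLast (by simp) ∈ a :: rest := List.getLast_mem _
  have hlast : (PySem.Chars.join sep (a :: rest)).getLast?
      = ((a :: rest).getLast (by simp)).getLast? := by
    conv_lhs => rw [hx]
    exact pv_join_last sep _ _ (h _ hbmem).1
  obtain ⟨c, hc⟩ : ∃ c, a.head? = some c := by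
    have ha := (h a (by simp)).1
    cases a with
    | nil => exact absurd rfl ha
    | cons c t => exact ⟨c, rfl⟩
  refine ⟨?_, ?_, ?_⟩
  · intro h0
    rw [h0] at hhead
    rw [hc] at hhead
    simp at hhead
  · intro d hd
    rw [hhead] at hd
    exact (h a (by simp)).2.1 d hd
  · intro d hd
    rw [hlast] at hd
    exact (h _ hbmem).2.2 d hd

theorem pv_para_ends (p : List String) (hp : p ≠ []) (hg : ∀ x ∈ p, GoodStr x) :
    pvJ p ≠ [] ∧ (∀ c, (pvJ p).head? = some c → PySem.Chars.isspace c = false)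
      ∧ (∀ c, (pvJ p).getLast? = some c → PySem.Chars.isspace c = false) := by
  unfold pvJ
  apply pv_join_good_ends
  · simp [hp]
  · intro cs hcs
    obtain ⟨x, hx, rfl⟩ := List.mem_map.mp hcs
    exact pv_good_facts x (hg x hx)

theorem pv_body_ends (P : List (List String)) (hne : P ≠ []) (hP : GoodPs P) :
    PySem.Chars.join ['\n', '\n'] (P.map pvJ) ≠ []
      ∧ (∀ c, (PySem.Chars.join ['\n', '\n'] (P.map pvJ)).head? = some c → PySem.Chars.isspace c = false)
      ∧ (∀ c, (PySem.Chars.join ['\n', '\n'] (P.map pvJ)).getLast? = some c → PySem.Chars.isspace c = false) := by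
  apply pv_join_good_ends
  · simp [hne]
  · intro cs hcs
    obtain ⟨p, hp, rfl⟩ := List.mem_map.mp hcs
    exact pv_para_ends p (hP p hp).1 (hP p hp).2

theorem pv_nl : ("\n" : String).toList = ['\n'] := by decide
theorem pv_nl2 : ("\n\n" : String).toList = ['\n', '\n'] := by decide

theorem pv_final (raw : String) : clean_commit_message raw = clean_commit_message_alt raw := by
  obtain ⟨heq, hps, hcur⟩ :=
    pv_inv (PySem.Str.splitlines raw) [] [] (by intro p h; simp at h) (by intro x h; simp at h)
  have heq' : pvA_loop [] ((PySem.Str.splitlines raw).map PySem.Str.rstrip)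
      = pvPre (pvB_loop [] [] (PySem.Str.splitlines raw)).1
          ++ (pvB_loop [] [] (PySem.Str.splitlines raw)).2 := by
    simpa [pvPre] using heq
  show PySem.Str.strip (PySem.Str.join "\n"
        (pvA_collapse [] (pvA_loop [] ((PySem.Str.splitlines raw).map PySem.Str.rstrip))))
      = PySem.Str.join "\n\n"
          ((if (pvB_loop [] [] (PySem.Str.splitlines raw)).2 = []
              then (pvB_loop [] [] (PySem.Str.splitlines raw)).1
              else (pvB_loop [] [] (PySem.Str.splitlines raw)).1
                    ++ [(pvB_loop [] [] (PySem.Str.splitlines raw)).2]).map (PySem.Str.join "\n"))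
  rw [heq', pv_collapse_main _ _ [] hps hcur, List.nil_append]
  set P := (pvB_loop [] [] (PySem.Str.splitlines raw)).1 with hPdef
  set C := (pvB_loop [] [] (PySem.Str.splitlines raw)).2 with hCdef
  apply String.toList_inj.mp
  simp only [PySem.Str.toList_strip, PySem.Str.toList_join, pv_nl, pv_nl2]
  have hmap : ∀ (ps : List (List String)),
      (ps.map (PySem.Str.join "\n")).map String.toList = ps.map pvJ := by
    intro ps
    simp [List.map_map, Function.comp, PySem.Str.toList_join, pv_nl, pvJ]
  by_cases hC : C = []
  · rw [if_pos hC, hC, List.append_nil]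
    by_cases hP0 : P = []
    · rw [hP0]
      simp [pvPre, PySem.Chars.join_nil, PySem.Chars.strip, PySem.Chars.lstrip, PySem.Chars.rstrip]
    · rw [show PySem.Chars.join ['\n'] ((pvPre P).map String.toList) = pvJ (pvPre P) from rfl]
      rw [pv_R2 P hps hP0, hmap]
      obtain ⟨hne, hh, hl⟩ := pv_body_ends P hP0 hps
      exact pv_strip_append_nl _ hne hh hl
  · rw [if_neg hC]
    rw [show PySem.Chars.join ['\n'] ((pvPre P ++ C).map String.toList) = pvJ (pvPre P ++ C) from rfl]
    rw [pv_R1 C hC P hps, hmap]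
    have hPC : GoodPs (P ++ [C]) := by
      intro p hpm
      rcases List.mem_append.mp hpm with h1 | h2
      · exact hps p h1
      · obtain rfl : p = C := by simpa using h2
        exact ⟨hC, hcur⟩
    obtain ⟨hne, hh, hl⟩ := pv_body_ends (P ++ [C]) (by simp) hPC
    exact pv_strip_of_ends _ hh hl

-- ===== VERDICT (by name: the statement is the Claim_ definition above) =====
theorem clean_commit_message_spec : Claim_equal_clean_commit_message := by
  intro raw _
  unfold Spec_clean_commit_message
  exact pv_final raw
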